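-- pv_equiv track=rewrite | github.com/pypi-data/pypi-mirror-83 | packages/szyfrow/szyfrow-0.0.3.tar.gz/szyfrow-0.0.3/szyfrow/playfair.py | playfair_bigrams
-- ===== SOURCE A (Python) =====
-- def playfair_bigrams(text, padding_letter='x', padding_replaces_repeat=True):
--     i = 0
--     bigrams = []
--     while i < len(text):
--         bigram = text[i:i+2]
--         if len(bigram) == 1:
--             i = len(text) + 1
--             bigram = bigram + padding_letter
--         else:
--             if bigram[0] == bigram[1]:
--                 bigram = bigram[0] + padding_letter
--                 if padding_replaces_repeat:
--                     i += 2
--                 else: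
--                     i += 1
--             else:
--                 i += 2
--         bigrams += [bigram]
--     return bigrams
-- ===== SOURCE B (Python) =====
-- def playfair_bigrams(text, padding_letter='x', padding_replaces_repeat=True):
--     bigrams = []
--     pending = None
--     for c in text:
--         if pending is None:
--             pending = c
--         elif pending == c:
--             bigrams.append(pending + padding_letter)
--             pending = None if padding_replaces_repeat else c
--         else:
--             bigrams.append(pending + c)
--             pending = None
--     if pending is not None:
--         bigrams.append(pending + padding_letter)
--     return bigrams
-- ===== Notes on version B (the rewrite author's own statement) =====
-- stated objective: simpler
-- what changed: Replaced the index-jumping while loop over slices by a single for-loop over characters maintaining one pending character, with a final flush for a leftover character.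
import Mathlib
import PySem

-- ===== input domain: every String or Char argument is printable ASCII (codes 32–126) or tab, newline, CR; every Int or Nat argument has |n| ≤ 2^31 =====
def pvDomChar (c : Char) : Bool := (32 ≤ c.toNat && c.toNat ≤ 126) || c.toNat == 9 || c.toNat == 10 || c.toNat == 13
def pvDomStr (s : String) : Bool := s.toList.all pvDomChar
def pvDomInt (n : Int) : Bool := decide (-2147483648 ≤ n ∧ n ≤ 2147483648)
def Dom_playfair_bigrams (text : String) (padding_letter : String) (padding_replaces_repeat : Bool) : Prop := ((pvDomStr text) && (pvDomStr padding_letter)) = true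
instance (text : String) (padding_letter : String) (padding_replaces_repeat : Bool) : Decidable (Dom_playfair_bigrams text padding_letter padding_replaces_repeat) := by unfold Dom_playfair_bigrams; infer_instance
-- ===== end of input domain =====

-- B replaces A's index-jumping while loop over slices by a single fold over characters
-- maintaining one pending character (objective: simpler); same return value, proved equal.


-- ===== PORT A =====
-- A's while loop: index i jumps by 1 or 2 (or to len+1); ported as recursion on i
-- with the slice text[i:i+2] taken literally as (drop i).take 2 (exact for 0 ≤ i).
def playfairLoopA (cs : List Char) (pad : String) (rep : Bool) (i : Nat)
    (bigrams : List String) : List String :=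
  if _h : i < cs.length then
    let bg := (cs.drop i).take 2
    if bg.length = 1 then
      -- i = len(text) + 1, loop exits at the next test
      bigrams ++ [String.mk bg ++ pad]
    else
      match bg with
      | a :: b :: _ =>
        if a = b then
          if rep then
            playfairLoopA cs pad rep (i + 2) (bigrams ++ [String.mk [a] ++ pad])
          else
            playfairLoopA cs pad rep (i + 1) (bigrams ++ [String.mk [a] ++ pad])
        else
          playfairLoopA cs pad rep (i + 2) (bigrams ++ [String.mk [a, b]])
      | _ => bigrams   -- unreachable: i < len forces bg nonempty
  else bigrams
termination_by cs.length - i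
decreasing_by all_goals omega

def playfair_bigrams (text : String) (padding_letter : String) (padding_replaces_repeat : Bool) : List String :=
  playfairLoopA text.toList padding_letter padding_replaces_repeat 0 []

-- ===== PORT B =====
-- B's for-loop: a fold over the characters with state (pending, bigrams), then a final flush.
def playfairStepB (pad : String) (rep : Bool) (st : Option Char × List String) (c : Char) :
    Option Char × List String :=
  match st.1 with
  | none => (some c, st.2)
  | some p =>
    if p = c then (if rep then none else some c, st.2 ++ [String.mk [p] ++ pad])
    else (none, st.2 ++ [String.mk [p, c]])

def playfair_bigrams_alt (text : String) (padding_letter : String) (padding_replaces_repeat : Bool) : List String :=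
  let st := text.toList.foldl (playfairStepB padding_letter padding_replaces_repeat) (none, [])
  match st.1 with
  | none => st.2
  | some p => st.2 ++ [String.mk [p] ++ padding_letter]

-- ===== PRECONDITION & SPEC =====
def Spec_playfair_bigrams (text : String) (padding_letter : String) (padding_replaces_repeat : Bool) (out : List String) : Prop := out = playfair_bigrams_alt text padding_letter padding_replaces_repeat
instance (text : String) (padding_letter : String) (padding_replaces_repeat : Bool) (out : List String) : Decidable (Spec_playfair_bigrams text padding_letter padding_replaces_repeat out) := by unfold Spec_playfair_bigrams; infer_instance

-- ===== CLAIM (what is proved, stated in full; the proofs are below) =====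
def Claim_equal_playfair_bigrams : Prop := ∀ (text : String) (padding_letter : String) (padding_replaces_repeat : Bool), Dom_playfair_bigrams text padding_letter padding_replaces_repeat → Spec_playfair_bigrams text padding_letter padding_replaces_repeat (playfair_bigrams text padding_letter padding_replaces_repeat)

-- ===== LEMMAS AND PROOFS =====

-- Reference recursion both ports are reduced to.
def goRef (pad : String) (rep : Bool) : List Char → List String
  | [] => []
  | [a] => [String.mk [a] ++ pad]
  | a :: b :: rest =>
    if a = b then
      if rep then (String.mk [a] ++ pad) :: goRef pad rep rest
      else (String.mk [a] ++ pad) :: goRef pad rep (b :: rest)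
    else
      String.mk [a, b] :: goRef pad rep rest
termination_by cs => cs.length
decreasing_by
  all_goals simp
  all_goals omega

theorem playfairLoopA_eq_goRef (pad : String) (rep : Bool) (cs : List Char) :
    ∀ i bigrams, playfairLoopA cs pad rep i bigrams = bigrams ++ goRef pad rep (cs.drop i) := by
  intro i
  induction hn : cs.length - i using Nat.strong_induction_on generalizing i with
  | _ n ih =>
    intro bigrams
    rw [playfairLoopA]
    by_cases h : i < cs.length
    · simp only [h, dif_pos]
      have hdrop : cs.drop i ≠ [] := by
        simp [List.drop_eq_nil_iff]; omega
      obtain ⟨a, rest, hd⟩ := List.exists_cons_of_ne_nil hdrop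
      have hrest : rest = cs.drop (i + 1) := by
        have h1 : (cs.drop i).drop 1 = cs.drop (i + 1) := by rw [List.drop_drop]
        simp [hd] at h1
        simp [h1]
      rcases rest with _ | ⟨b, rest2⟩
      · -- single-char slice
        simp [hd, goRef]
      · have hrest2 : rest2 = cs.drop (i + 2) := by
          have h1 : (cs.drop (i + 1)).drop 1 = cs.drop (i + 2) := by
            rw [List.drop_drop]
          rw [← hrest] at h1
          simp at h1
          simp [h1]
        simp only [hd, List.take_succ_cons, List.length_cons]
        simp only [List.take_zero]
        by_cases hab : a = b
        · simp only [hab, if_true]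
          rcases rep with _ | _
          · simp only [Bool.false_eq_true, if_false]
            rw [ih (cs.length - (i+1)) (by omega) (i+1) rfl]
            simp [goRef, ← hrest]
          · simp only [if_true]
            rw [ih (cs.length - (i+2)) (by omega) (i+2) rfl]
            simp [goRef, ← hrest2]
        · simp only [if_neg hab]
          rw [ih (cs.length - (i+2)) (by omega) (i+2) rfl]
          simp [goRef, hab, ← hrest2]
    · simp only [h, dif_neg, not_false_iff]
      have : cs.drop i = [] := by simp [List.drop_eq_nil_iff]; omega
      simp [this, goRef]

def flushB (pad : String) (st : Option Char × List String) : List String :=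
  match st.1 with
  | none => st.2
  | some p => st.2 ++ [String.mk [p] ++ pad]

theorem foldB_eq_goRef (pad : String) (rep : Bool) (cs : List Char) :
    ∀ (pend : Option Char) (acc : List String),
      flushB pad (cs.foldl (playfairStepB pad rep) (pend, acc)) =
        acc ++ goRef pad rep ((pend.toList) ++ cs) := by
  induction cs with
  | nil =>
    intro pend acc
    rcases pend with _ | p <;> simp [flushB, goRef]
  | cons c rest ih =>
    intro pend acc
    rcases pend with _ | p
    · simp only [List.foldl_cons, playfairStepB, Option.toList]
      rw [ih (some c) acc]
      simp
    · by_cases hpc : p = c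
      · subst hpc
        simp only [List.foldl_cons, playfairStepB, Option.toList]
        rw [if_pos trivial]
        rcases rep with _ | _
        · simp only [Bool.false_eq_true, if_false]
          rw [ih (some p) _]
          simp [goRef]
        · simp only [if_true]
          rw [ih none _]
          simp [goRef]
      · simp only [List.foldl_cons, playfairStepB, if_neg hpc, Option.toList]
        rw [ih none _]
        simp [goRef, hpc]

-- ===== VERDICT (by name: the statement is the Claim_ definition above) =====
theorem playfair_bigrams_spec : Claim_equal_playfair_bigrams := by
  intro text pad rep _
  unfold Spec_playfair_bigrams playfair_bigrams playfair_bigrams_alt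
  rw [playfairLoopA_eq_goRef]
  have := foldB_eq_goRef pad rep text.toList none []
  simp [flushB] at this ⊢
  rw [← this]
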